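-- pv_equiv track=rewrite | github.com/ialegrejmnz/Graph_Maker_Analysis_v1 | charts/common_functions.py | format_category_name
-- ===== SOURCE A (Python) =====
-- def format_category_name(category_name, max_length=10):
--     """
--     Format category names, breaking them into multiple lines
--     if they exceed max_length characters.
--     """
--     category_str = str(category_name).lower().capitalize()
--
--     if len(category_str) <= max_length:
--         return category_str
--
--     # Find the best place to break the string
--     words = category_str.split()
--     if len(words) == 1:
--         # Single long word - break at max_length
--         return category_str[:max_length] + '\n' + category_str[max_length:]
--     else:
--         # Multiple words - try to break at word boundaries
--         first_line = ""
--         second_line = ""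
--
--         for word in words:
--             if len(first_line + word) <= max_length and not second_line:
--                 if first_line:
--                     first_line += " " + word
--                 else:
--                     first_line = word
--             else:
--                 if second_line:
--                     second_line += " " + word
--                 else:
--                     second_line = word
--
--         return first_line + '\n' + second_line if second_line else first_line
-- ===== SOURCE B (Python) =====
-- def _split_index(words, acc, max_length):
--     # number of leading words that fit on the first line, greedily
--     if not words:
--         return 0
--     w = words[0]
--     if len(acc + w) > max_length:
--         return 0
--     return 1 + _split_index(words[1:], (acc + " " + w) if acc else w, max_length)
--
--
-- def format_category_name(category_name, max_length=10):
--     category_str = str(category_name).lower().capitalize()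
--     if len(category_str) <= max_length:
--         return category_str
--     words = category_str.split()
--     if len(words) == 1:
--         return category_str[:max_length] + '\n' + category_str[max_length:]
--     split = _split_index(words, "", max_length)
--     first_line = " ".join(words[:split])
--     second_line = " ".join(words[split:])
--     return first_line + '\n' + second_line if second_line else first_line
-- ===== Notes on version B (the rewrite author's own statement) =====
-- stated objective: alternative
-- what changed: A grows two accumulator strings (first_line/second_line) with a stateful flag inside one loop; B instead computes the greedy split index over the word list recursively and builds both lines by space-joining the two slices of the word list.
import Mathlib
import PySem

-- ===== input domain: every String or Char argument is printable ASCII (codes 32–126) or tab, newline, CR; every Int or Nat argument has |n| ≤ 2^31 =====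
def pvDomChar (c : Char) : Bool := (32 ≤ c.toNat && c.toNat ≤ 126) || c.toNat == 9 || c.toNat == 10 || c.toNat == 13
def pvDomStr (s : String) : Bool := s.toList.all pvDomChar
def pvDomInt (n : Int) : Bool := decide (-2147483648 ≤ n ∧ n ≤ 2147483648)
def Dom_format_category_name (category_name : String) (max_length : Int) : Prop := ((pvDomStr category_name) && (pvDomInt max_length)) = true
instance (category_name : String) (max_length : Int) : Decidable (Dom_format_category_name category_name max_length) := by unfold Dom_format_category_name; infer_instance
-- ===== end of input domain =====

-- B replaces A's two accumulating line strings with a recursively computed split index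
-- followed by two joins (objective: alternative decomposition, same cost).

-- Python's str.capitalize() on an already lowered string: first char to upper, rest to lower (exact on ASCII)
def pyCapitalize (cs : List Char) : List Char :=
  match cs with
  | [] => []
  | c :: rest => PySem.Chars.upperChar c :: PySem.Chars.lower rest

-- ===== PORT A =====
-- the body of A's for-loop over words, state = (first_line, second_line)
def fcnLoopA (max_length : Int) (st : List Char × List Char) (word : List Char) : List Char × List Char :=
  if PySem.Chars.len (st.1 ++ word) ≤ max_length ∧ st.2 = [] then
    if st.1 ≠ [] then (st.1 ++ ' ' :: word, st.2) else (word, st.2)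
  else
    if st.2 ≠ [] then (st.1, st.2 ++ ' ' :: word) else (st.1, word)

def format_category_name (category_name : String) (max_length : Int) : String :=
  let category_str := pyCapitalize (PySem.Chars.lower category_name.toList)
  if PySem.Chars.len category_str ≤ max_length then String.ofList category_str
  else
    let words := PySem.Chars.split₀ category_str
    if words.length = 1 then
      String.ofList (PySem.List.slice category_str none (some max_length) ++
        '\n' :: PySem.List.slice category_str (some max_length) none)
    else
      let fs := words.foldl (fcnLoopA max_length) ([], [])
      if fs.2 ≠ [] then String.ofList (fs.1 ++ '\n' :: fs.2) else String.ofList fs.1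

-- ===== PORT B =====
-- Source B's _split_index: how many leading words fit greedily on the first line
def fcnSplitIndex (words : List (List Char)) (acc : List Char) (max_length : Int) : Nat :=
  match words with
  | [] => 0
  | w :: rest =>
    if PySem.Chars.len (acc ++ w) > max_length then 0
    else 1 + fcnSplitIndex rest (if acc ≠ [] then acc ++ ' ' :: w else w) max_length

def format_category_name_alt (category_name : String) (max_length : Int) : String :=
  let category_str := pyCapitalize (PySem.Chars.lower category_name.toList)
  if PySem.Chars.len category_str ≤ max_length then String.ofList category_str
  else
    let words := PySem.Chars.split₀ category_str
    if words.length = 1 then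
      String.ofList (PySem.List.slice category_str none (some max_length) ++
        '\n' :: PySem.List.slice category_str (some max_length) none)
    else
      let sp := fcnSplitIndex words [] max_length
      let first_line := PySem.Chars.join [' '] (words.take sp)
      let second_line := PySem.Chars.join [' '] (words.drop sp)
      if second_line ≠ [] then String.ofList (first_line ++ '\n' :: second_line)
      else String.ofList first_line

-- ===== PRECONDITION & SPEC =====
def Spec_format_category_name (category_name : String) (max_length : Int) (out : String) : Prop := out = format_category_name_alt category_name max_length
instance (category_name : String) (max_length : Int) (out : String) : Decidable (Spec_format_category_name category_name max_length out) := by unfold Spec_format_category_name; infer_instance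

-- ===== CLAIM (what is proved, stated in full; the proofs are below) =====
def Claim_equal_format_category_name : Prop := ∀ (category_name : String) (max_length : Int), Dom_format_category_name category_name max_length → Spec_format_category_name category_name max_length (format_category_name category_name max_length)

-- ===== LEMMAS AND PROOFS =====

-- " ".join written as head ++ flatMap
lemma joinCons (w : List Char) (ws : List (List Char)) :
    PySem.Chars.join [' '] (w :: ws) = w ++ ws.flatMap (fun v => ' ' :: v) := by
  induction ws generalizing w with
  | nil => simp [PySem.Chars.join_singleton]
  | cons v rest ih =>
      rw [PySem.Chars.join_cons_cons, ih]
      simp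

-- once second_line is nonempty, every remaining word is appended to it with a space
lemma loopA_absorb (ml : Int) (ws : List (List Char)) (fl sl : List Char) (h : sl ≠ []) :
    ws.foldl (fcnLoopA ml) (fl, sl) = (fl, sl ++ ws.flatMap (fun v => ' ' :: v)) := by
  induction ws generalizing sl with
  | nil => simp
  | cons w rest ih =>
      have step : fcnLoopA ml (fl, sl) w = (fl, sl ++ ' ' :: w) := by
        simp [fcnLoopA, h]
      rw [List.foldl_cons, step, ih (sl ++ ' ' :: w) (by simp)]
      simp

-- the main loop with a nonempty first line and empty second line equals split-index + joins
lemma loopA_main (ml : Int) (ws : List (List Char)) (acc : List Char) (h : acc ≠ [])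
    (hws : ∀ v ∈ ws, v ≠ []) :
    ws.foldl (fcnLoopA ml) (acc, []) =
      (acc ++ (ws.take (fcnSplitIndex ws acc ml)).flatMap (fun v => ' ' :: v),
       PySem.Chars.join [' '] (ws.drop (fcnSplitIndex ws acc ml))) := by
  induction ws generalizing acc with
  | nil => simp [fcnSplitIndex, PySem.Chars.join_nil]
  | cons w rest ih =>
      by_cases hle : PySem.Chars.len (acc ++ w) ≤ ml
      · have hle' : (acc.length : Int) + w.length ≤ ml := by
          simpa [PySem.Chars.len] using hle
        have step : fcnLoopA ml (acc, []) w = (acc ++ ' ' :: w, []) := by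
          simp only [fcnLoopA]
          rw [if_pos ⟨hle, trivial⟩]
          simp [h]
        have hk : fcnSplitIndex (w :: rest) acc ml = 1 + fcnSplitIndex rest (acc ++ ' ' :: w) ml := by
          simp [fcnSplitIndex, h]
          omega
        rw [List.foldl_cons, step,
          ih (acc ++ ' ' :: w) (by simp) (fun v hv => hws v (List.mem_cons_of_mem _ hv)), hk]
        simp [List.take_succ_cons, Nat.add_comm 1]
      · have hle' : ml < (acc.length : Int) + w.length := by
          simpa [PySem.Chars.len, not_le] using hle
        have step : fcnLoopA ml (acc, []) w = (acc, w) := by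
          simp only [fcnLoopA]
          rw [if_neg (fun hc => hle hc.1)]
          simp
        have hk : fcnSplitIndex (w :: rest) acc ml = 0 := by
          simp [fcnSplitIndex]
          omega
        rw [List.foldl_cons, step, loopA_absorb ml rest acc w (hws w (List.mem_cons_self)), hk]
        simp [joinCons]

-- every word produced by split() is nonempty
lemma split₀_go_ne_nil (s cur : List Char) (acc : List (List Char))
    (hacc : ∀ w ∈ acc, w ≠ []) :
    ∀ w ∈ PySem.Chars.split₀.go s cur acc, w ≠ [] := by
  induction s generalizing cur acc with
  | nil =>
      intro w hw
      by_cases hc : cur.isEmpty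
      · simp only [PySem.Chars.split₀.go, hc, if_true] at hw
        exact hacc w (by simpa using hw)
      · have hcur : cur ≠ [] := by simpa [List.isEmpty_iff] using hc
        simp only [PySem.Chars.split₀.go, hc] at hw
        simp at hw
        rcases hw with hw | hw
        · exact hacc w hw
        · subst hw; simpa using hcur
  | cons c rest ih =>
      intro w hw
      by_cases hs : PySem.Chars.isspace c
      · by_cases hc : cur.isEmpty
        · simp only [PySem.Chars.split₀.go, hs, hc, if_true] at hw
          exact ih [] acc hacc w hw
        · have hcur : cur ≠ [] := by simpa [List.isEmpty_iff] using hc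
          simp only [PySem.Chars.split₀.go, hs, hc, if_true] at hw
          refine ih [] (cur.reverse :: acc) ?_ w hw
          intro v hv
          rcases List.mem_cons.mp hv with hv | hv
          · subst hv; simpa using hcur
          · exact hacc v hv
      · simp only [PySem.Chars.split₀.go, hs] at hw
        exact ih (c :: cur) acc hacc w hw

lemma split₀_ne_nil (s : List Char) : ∀ w ∈ PySem.Chars.split₀ s, w ≠ [] := by
  have := split₀_go_ne_nil s [] [] (by simp)
  simpa [PySem.Chars.split₀] using this

-- ===== VERDICT (by name: the statement is the Claim_ definition above) =====
theorem format_category_name_spec : Claim_equal_format_category_name := by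
  intro category_name max_length _
  unfold Spec_format_category_name format_category_name format_category_name_alt
  by_cases h1 : ((pyCapitalize (PySem.Chars.lower category_name.toList)).length : Int) ≤ max_length
  · simp [PySem.Chars.len, h1]
  · by_cases h2 : (PySem.Chars.split₀ (pyCapitalize (PySem.Chars.lower category_name.toList))).length = 1
    · simp [PySem.Chars.len, h1, h2]
    · have hws := split₀_ne_nil (pyCapitalize (PySem.Chars.lower category_name.toList))
      have hpair :
          (PySem.Chars.split₀ (pyCapitalize (PySem.Chars.lower category_name.toList))).foldl
              (fcnLoopA max_length) ([], []) =
            (PySem.Chars.join [' ']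
              ((PySem.Chars.split₀ (pyCapitalize (PySem.Chars.lower category_name.toList))).take
                (fcnSplitIndex (PySem.Chars.split₀ (pyCapitalize (PySem.Chars.lower category_name.toList))) [] max_length)),
             PySem.Chars.join [' ']
              ((PySem.Chars.split₀ (pyCapitalize (PySem.Chars.lower category_name.toList))).drop
                (fcnSplitIndex (PySem.Chars.split₀ (pyCapitalize (PySem.Chars.lower category_name.toList))) [] max_length))) := by
        cases hwe : PySem.Chars.split₀ (pyCapitalize (PySem.Chars.lower category_name.toList)) with
        | nil => simp [fcnSplitIndex, PySem.Chars.join_nil]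
        | cons w rest =>
            rw [hwe] at hws
            have hw : w ≠ [] := hws w List.mem_cons_self
            have hrest : ∀ v ∈ rest, v ≠ [] := fun v hv => hws v (List.mem_cons_of_mem _ hv)
            by_cases h3 : PySem.Chars.len w ≤ max_length
            · have step : fcnLoopA max_length ([], []) w = (w, []) := by
                simp only [fcnLoopA]
                rw [if_pos ⟨by simpa using h3, trivial⟩]
                simp
              have hk : fcnSplitIndex (w :: rest) [] max_length =
                  1 + fcnSplitIndex rest w max_length := by
                have h3' : (w.length : Int) ≤ max_length := by simpa [PySem.Chars.len] using h3
                simp only [fcnSplitIndex]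
                rw [if_neg (by simp [PySem.Chars.len]; omega)]
                simp
              rw [List.foldl_cons, step, loopA_main max_length rest w hw hrest, hk]
              simp [List.take_succ_cons, Nat.add_comm 1, joinCons]
            · have step : fcnLoopA max_length ([], []) w = ([], w) := by
                simp only [fcnLoopA]
                rw [if_neg (fun hc => h3 (by simpa using hc.1))]
                simp
              have hk : fcnSplitIndex (w :: rest) [] max_length = 0 := by
                have h3' : max_length < (w.length : Int) := by
                  simpa [PySem.Chars.len, not_le] using h3
                simp only [fcnSplitIndex]
                rw [if_pos (by simpa [PySem.Chars.len] using h3')]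
              rw [List.foldl_cons, step, loopA_absorb max_length rest [] w hw, hk]
              simp [joinCons]
      simp [PySem.Chars.len, h1, h2, hpair]
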